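-- pv_equiv track=rewrite | github.com/MarielaCarlita/M | codigo2.py | fix_ess_column_indices
-- ===== SOURCE A (Python) =====
-- import copy
--
-- def fix_ess_column_indices(essential_indices, pivots):
--     fixed_ess = copy.deepcopy(essential_indices)
--     for ess_i in range(len(fixed_ess)):
--         pivot_index = 0
--         while pivot_index < len(pivots) and fixed_ess[ess_i] >= pivots[pivot_index]:
--             pivot_index += 1
--             fixed_ess[ess_i] += 1
--     return fixed_ess
-- ===== SOURCE B (Python) =====
-- def fix_ess_column_indices(essential_indices, pivots):
--     # Prefix maxima of pivots[k]-k: A's per-element scan stops at the first k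
--     # with e < pivots[k]-k, which is the first k where this prefix max exceeds e,
--     # and the prefix max is nondecreasing, so binary search finds it.
--     M = []
--     best = None
--     for k, p in enumerate(pivots):
--         v = p - k
--         if best is None or v > best:
--             best = v
--         M.append(best)
--     out = []
--     n = len(M)
--     for e in essential_indices:
--         lo, hi = 0, n
--         while lo < hi:
--             mid = (lo + hi) // 2
--             if e < M[mid]:
--                 hi = mid
--             else:
--                 lo = mid + 1
--         out.append(e + lo)
--     return out
-- ===== Notes on version B (the rewrite author's own statement) =====
-- stated objective: faster
-- what changed: A rescans pivots linearly for every essential index; B precomputes the nondecreasing prefix maxima of pivots[k]-k once and answers each essential index with a binary search over it.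
import Mathlib
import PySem

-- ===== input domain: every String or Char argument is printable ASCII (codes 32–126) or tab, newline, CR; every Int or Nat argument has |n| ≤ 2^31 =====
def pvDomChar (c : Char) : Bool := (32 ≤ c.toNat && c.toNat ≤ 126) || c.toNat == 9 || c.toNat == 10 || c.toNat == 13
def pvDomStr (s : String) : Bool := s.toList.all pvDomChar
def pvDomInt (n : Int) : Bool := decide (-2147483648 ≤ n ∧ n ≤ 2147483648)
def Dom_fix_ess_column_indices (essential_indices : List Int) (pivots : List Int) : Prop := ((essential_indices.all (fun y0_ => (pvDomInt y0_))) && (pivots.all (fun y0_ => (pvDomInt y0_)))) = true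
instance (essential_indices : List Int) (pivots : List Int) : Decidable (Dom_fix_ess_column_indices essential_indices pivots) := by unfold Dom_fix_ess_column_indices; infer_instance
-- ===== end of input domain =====

-- B replaces A's per-element linear rescan of pivots by one prefix-max pass over
-- pivots[k]-k followed by a binary search per element (objective: faster).

-- ===== PORT A =====
-- A's inner while loop: while pivot_index < len(pivots) and cur >= pivots[pivot_index]:
--   pivot_index += 1; cur += 1
def pvAwhile (pivots : List Int) (cur : Int) (k : Nat) : Int :=
  if h : k < pivots.length then
    if pivots[k] ≤ cur then pvAwhile pivots (cur + 1) (k + 1) else cur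
  else cur
termination_by pivots.length - k

-- A: for each element of the (deep-copied) list, run the while loop on it.
def fix_ess_column_indices (essential_indices : List Int) (pivots : List Int) : List Int :=
  essential_indices.map (fun e => pvAwhile pivots e 0)

-- ===== PORT B =====
-- B's first pass: M = running maxima of pivots[k]-k (best starts as None).
-- pvBest mirrors Source B's "if best is None or v > best: best = v" update.
def pvBest (best : Option Int) (v : Int) : Int :=
  match best with
  | none => v
  | some b0 => if b0 < v then v else b0

def pvBuildM : List Int → Nat → Option Int → List Int
  | [], _, _ => []
  | p :: rest, k, best =>
    let b : Int := pvBest best (p - (k : Int))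
    b :: pvBuildM rest (k + 1) (some b)

-- B's binary search: smallest lo with e < M[lo] (lo = len(M) if none).
def pvBsearch (M : List Int) (e : Int) (lo hi : Nat) : Nat :=
  if lo < hi then
    let mid := (lo + hi) / 2
    if e < M.getD mid 0 then pvBsearch M e lo mid else pvBsearch M e (mid + 1) hi
  else lo
termination_by hi - lo

def fix_ess_column_indices_alt (essential_indices : List Int) (pivots : List Int) : List Int :=
  let M := pvBuildM pivots 0 none
  essential_indices.map (fun e => e + (pvBsearch M e 0 M.length : Int))

-- ===== PRECONDITION & SPEC =====
def Spec_fix_ess_column_indices (essential_indices : List Int) (pivots : List Int) (out : List Int) : Prop := out = fix_ess_column_indices_alt essential_indices pivots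
instance (essential_indices : List Int) (pivots : List Int) (out : List Int) : Decidable (Spec_fix_ess_column_indices essential_indices pivots out) := by unfold Spec_fix_ess_column_indices; infer_instance

-- ===== CLAIM (what is proved, stated in full; the proofs are below) =====
def Claim_equal_fix_ess_column_indices : Prop := ∀ (essential_indices : List Int) (pivots : List Int), Dom_fix_ess_column_indices essential_indices pivots → Spec_fix_ess_column_indices essential_indices pivots (fix_ess_column_indices essential_indices pivots)

-- ===== LEMMAS AND PROOFS =====

-- ghost: number of steps A's while loop takes on suffix l, starting with value cur
def pvCross : List Int → Int → Nat
  | [], _ => 0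
  | p :: rest, cur => if p ≤ cur then pvCross rest (cur + 1) + 1 else 0

theorem pvAwhile_eq_cross : ∀ (n : Nat) (pivots : List Int) (cur : Int) (k : Nat),
    pivots.length - k = n →
    pvAwhile pivots cur k = cur + (pvCross (pivots.drop k) cur : Int) := by
  intro n
  induction n with
  | zero =>
    intro pivots cur k hn
    rw [pvAwhile]
    rw [dif_neg (by omega)]
    rw [List.drop_eq_nil_of_le (by omega)]
    simp [pvCross]
  | succ m ih =>
    intro pivots cur k hn
    have hk : k < pivots.length := by omega
    rw [pvAwhile, dif_pos hk]
    have hdrop : pivots.drop k = pivots[k] :: pivots.drop (k + 1) :=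
      (List.getElem_cons_drop hk).symm
    rw [hdrop]
    by_cases hle : pivots[k] ≤ cur
    · rw [if_pos hle]
      rw [ih pivots (cur + 1) (k + 1) (by omega)]
      simp [pvCross, hle]
      ring
    · rw [if_neg hle]
      simp [pvCross, hle]

theorem pvBest_le {best : Option Int} {v e : Int}
    (hb : ∀ b, best = some b → b ≤ e) (hv : v ≤ e) : pvBest best v ≤ e := by
  cases best with
  | none => simpa [pvBest] using hv
  | some b0 =>
    have := hb b0 rfl
    simp only [pvBest]
    split <;> omega

theorem lt_pvBest {best : Option Int} {v e : Int} (hv : e < v) : e < pvBest best v := by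
  cases best with
  | none => simpa [pvBest] using hv
  | some b0 =>
    simp only [pvBest]
    split <;> omega

theorem pvBest_ge {v b : Int} : b ≤ pvBest (some b) v := by
  simp only [pvBest]; split <;> omega

theorem pvBuildM_findIdx : ∀ (l : List Int) (k : Nat) (best : Option Int) (e : Int),
    (∀ b, best = some b → b ≤ e) →
    (pvBuildM l k best).findIdx (fun v => decide (e < v)) = pvCross l (e + (k : Int)) := by
  intro l
  induction l with
  | nil => intro k best e _; simp [pvBuildM, pvCross]
  | cons p rest ih =>
    intro k best e hbest
    rw [pvBuildM]
    rw [List.findIdx_cons]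
    by_cases hle : p ≤ e + (k : Int)
    · -- continue: v ≤ e, so the running max stays ≤ e, predicate false at head
      have hvle : p - (k : Int) ≤ e := by omega
      have hble : pvBest best (p - (k : Int)) ≤ e := pvBest_le hbest hvle
      have hfalse : decide (e < pvBest best (p - (k : Int))) = false := by
        simp; omega
      rw [hfalse]
      simp only [cond_false]
      rw [ih (k + 1) (some (pvBest best (p - (k : Int)))) e
        (by intro b' hb'; injection hb' with h; omega)]
      have hcast : e + ((k + 1 : Nat) : Int) = (e + (k : Int)) + 1 := by push_cast; ring
      rw [hcast, pvCross, if_pos hle]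
    · -- stop: e < v ≤ running max, predicate true at head
      have hev : e < p - (k : Int) := by omega
      have heb : e < pvBest best (p - (k : Int)) := lt_pvBest hev
      have htrue : decide (e < pvBest best (p - (k : Int))) = true := by
        simpa using heb
      rw [htrue]
      simp only [cond_true]
      rw [pvCross, if_neg hle]

theorem pvBuildM_lb : ∀ (l : List Int) (k : Nat) (b : Int),
    ∀ x ∈ pvBuildM l k (some b), b ≤ x := by
  intro l
  induction l with
  | nil => intro k b x hx; simp [pvBuildM] at hx
  | cons p rest ih =>
    intro k b x hx
    rw [pvBuildM] at hx
    rcases List.mem_cons.1 hx with h | h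
    · subst h; exact pvBest_ge
    · exact le_trans pvBest_ge (ih (k + 1) (pvBest (some b) (p - (k : Int))) x h)

theorem pvBuildM_pairwise : ∀ (l : List Int) (k : Nat) (best : Option Int),
    (pvBuildM l k best).Pairwise (· ≤ ·) := by
  intro l
  induction l with
  | nil => intro k best; simp [pvBuildM]
  | cons p rest ih =>
    intro k best
    rw [pvBuildM]
    exact List.Pairwise.cons (fun x hx => pvBuildM_lb rest (k + 1) _ x hx) (ih (k + 1) _)

theorem pvBsearch_inv (M : List Int) (e : Int)
    (hmono : ∀ i j (_hi : i < M.length) (_hj : j < M.length), i < j → M[i] ≤ M[j])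
    (L : Nat)
    (hnot : ∀ j (h : j < M.length), j < L → ¬ e < M[j])
    (hyes : ∀ (h : L < M.length), e < M[L]) :
    ∀ (n lo hi : Nat), hi - lo ≤ n → hi ≤ M.length → lo ≤ L → L ≤ hi →
      pvBsearch M e lo hi = L := by
  intro n
  induction n with
  | zero =>
    intro lo hi hn _ hloL hLhi
    rw [pvBsearch, if_neg (by omega)]
    omega
  | succ m ih =>
    intro lo hi hn hhi hloL hLhi
    by_cases hlt : lo < hi
    · rw [pvBsearch, if_pos hlt]
      set mid := (lo + hi) / 2 with hmid
      have hmidlt : mid < M.length := by omega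
      have hgetD : M.getD mid 0 = M[mid] := List.getD_eq_getElem M 0 hmidlt
      by_cases hpred : e < M.getD mid 0
      · rw [if_pos hpred]
        rw [hgetD] at hpred
        have hLmid : L ≤ mid := by
          by_contra hcon
          exact hnot mid hmidlt (by omega) hpred
        exact ih lo mid (by omega) (by omega) hloL hLmid
      · rw [if_neg hpred]
        rw [hgetD] at hpred
        have hmidL : mid + 1 ≤ L := by
          by_contra hcon
          have hLlt : L < M.length := by omega
          have hLmid : M[L] ≤ M[mid] := by
            rcases Nat.lt_or_ge L mid with h | h
            · exact hmono L mid hLlt hmidlt h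
            · have hEq : L = mid := by omega
              subst hEq; exact le_refl _
          exact hpred (lt_of_lt_of_le (hyes hLlt) hLmid)
        exact ih (mid + 1) hi (by omega) hhi hmidL hLhi
    · rw [pvBsearch, if_neg hlt]
      omega

-- ===== VERDICT (by name: the statement is the Claim_ definition above) =====
theorem fix_ess_column_indices_spec : Claim_equal_fix_ess_column_indices := by
  intro ess pivots _
  unfold Spec_fix_ess_column_indices fix_ess_column_indices fix_ess_column_indices_alt
  simp only [List.map_inj_left]
  intro e _
  set M := pvBuildM pivots 0 none with hM
  have hfind : M.findIdx (fun v => decide (e < v)) = pvCross pivots e := by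
    have := pvBuildM_findIdx pivots 0 none e (by intro b hb; cases hb)
    simpa [hM] using this
  have hLle : M.findIdx (fun v => decide (e < v)) ≤ M.length :=
    List.findIdx_le_length
  rw [pvAwhile_eq_cross pivots.length pivots e 0 (by omega)]
  have hmono : ∀ i j (_hi : i < M.length) (_hj : j < M.length), i < j → M[i] ≤ M[j] :=
    fun i j hi hj hij =>
      (List.pairwise_iff_getElem).1 (pvBuildM_pairwise pivots 0 none) i j hi hj hij
  rw [pvBsearch_inv M e hmono (M.findIdx (fun v => decide (e < v)))
    (fun j hj hjL => by
      have h := List.not_of_lt_findIdx (p := fun v => decide (e < v)) (xs := M) hjL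
      simp at h
      exact fun hcon => absurd hcon (by omega))
    (fun h => by
      have := List.findIdx_getElem (p := fun v => decide (e < v)) (xs := M) (w := h)
      simpa using this)
    M.length 0 M.length (by omega) (le_refl _) (by omega) hLle]
  rw [hfind]
  simp
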